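-- pv_equiv track=rewrite | github.com/mitsuhiko/aoc25 | day12.py | solve_region_optimized
-- ===== SOURCE A (Python) =====
-- def get_shape_dims(shape):
--     """Get width and height of shape"""
--     if not shape:
--         return 0, 0
--     max_x = max(x for x, y in shape)
--     max_y = max(y for x, y in shape)
--     return max_x + 1, max_y + 1
--
-- def can_place(grid, shape, pos_x, pos_y, width, height):
--     """Check if shape can be placed at position"""
--     for x, y in shape:
--         nx, ny = pos_x + x, pos_y + y
--         if nx < 0 or nx >= width or ny < 0 or ny >= height:
--             return False
--         if grid[ny][nx]:
--             return False
--     return True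
--
-- def place_shape(grid, shape, pos_x, pos_y):
--     """Place shape on grid"""
--     for x, y in shape:
--         grid[pos_y + y][pos_x + x] = True
--
-- def remove_shape(grid, shape, pos_x, pos_y):
--     """Remove shape from grid"""
--     for x, y in shape:
--         grid[pos_y + y][pos_x + x] = False
--
-- def solve_region_optimized(width, height, shapes_with_orientations, pieces_to_place):
--     """Optimized solver using DLX-style approach with better pruning"""
--     grid = [[False] * width for _ in range(height)]
--
--     # Flatten pieces list
--     pieces = []
--     for shape_id, count in enumerate(pieces_to_place):
--         for instance in range(count):
--             pieces.append(shape_id)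
--
--     if not pieces:
--         return True
--
--     # Quick check: total cells needed
--     total_cells_needed = sum(
--         len(shapes_with_orientations[sid][0]) * pieces_to_place[sid]
--         for sid in range(len(pieces_to_place))
--     )
--     total_cells_available = width * height
--
--     if total_cells_needed > total_cells_available:
--         return False
--
--     # Sort pieces by size (largest first) for better pruning
--     pieces_sorted = sorted(
--         range(len(pieces)), key=lambda i: -len(shapes_with_orientations[pieces[i]][0])
--     )
--
--     def backtrack(idx):
--         if idx >= len(pieces_sorted):
--             return True
--
--         piece_idx = pieces_sorted[idx]
--         shape_id = pieces[piece_idx]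
--         orientations = shapes_with_orientations[shape_id]
--
--         for shape in orientations:
--             shape_w, shape_h = get_shape_dims(shape)
--
--             for py in range(height - shape_h + 1):
--                 for px in range(width - shape_w + 1):
--                     if can_place(grid, shape, px, py, width, height):
--                         place_shape(grid, shape, px, py)
--                         if backtrack(idx + 1):
--                             return True
--                         remove_shape(grid, shape, px, py)
--
--         return False
--
--     return backtrack(0)
-- ===== SOURCE B (Python) =====
-- def solve_region_optimized(width, height, shapes_with_orientations, pieces_to_place):
--     """Staged solver: build per-shape placement-mask tables once, then search the
--     multiset of pieces directly as (shape_id, remaining_count) in id order -- no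
--     flattened piece list, no sorting, no mutable grid, no per-node placement scan."""
--     if not any(c > 0 for c in pieces_to_place):
--         return True
--
--     needed = sum(len(shapes_with_orientations[sid][0]) * pieces_to_place[sid]
--                  for sid in range(len(pieces_to_place)))
--     if needed > width * height:
--         return False
--
--     # Distinct index-building pass: every in-bounds placement of every orientation
--     # of shape sid, encoded as one occupancy-bitmask integer.
--     tables = []
--     for sid in range(len(pieces_to_place)):
--         masks = []
--         for shape in shapes_with_orientations[sid]:
--             if shape:
--                 sw = max(x for x, y in shape) + 1
--                 sh = max(y for x, y in shape) + 1
--             else: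
--                 sw = sh = 0
--             for py in range(height - sh + 1):
--                 for px in range(width - sw + 1):
--                     m = 0
--                     for x, y in shape:
--                         nx, ny = px + x, py + y
--                         if not (0 <= nx < width and 0 <= ny < height):
--                             m = None
--                             break
--                         m |= 1 << (ny * width + nx)
--                     if m is not None:
--                         masks.append(m)
--         tables.append(masks)
--
--     def go(sid, left, grid):
--         if sid == len(tables):
--             return True
--         if left <= 0:
--             nxt = sid + 1
--             return go(nxt, pieces_to_place[nxt] if nxt < len(tables) else 0, grid)
--         for m in tables[sid]:
--             if grid & m == 0 and go(sid, left - 1, grid | m):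
--                 return True
--         return False
--
--     return go(0, pieces_to_place[0], 0)
-- ===== Notes on version B (the rewrite author's own statement) =====
-- stated objective: alternative
-- what changed: B replaces A's flatten-sort-backtrack over individual pieces on a mutable 2D boolean grid by a staged design: a distinct index-building pass first precomputes every in-bounds placement of every orientation of every shape as an occupancy-bitmask list, and the search then consumes (shape_id, remaining_count) pairs of the piece multiset in id order (no flattened piece list, no sorting) over those precomputed masks, testing with AND and extending with OR instead of per-cell can_place/place/remove loops; …
import Mathlib
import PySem

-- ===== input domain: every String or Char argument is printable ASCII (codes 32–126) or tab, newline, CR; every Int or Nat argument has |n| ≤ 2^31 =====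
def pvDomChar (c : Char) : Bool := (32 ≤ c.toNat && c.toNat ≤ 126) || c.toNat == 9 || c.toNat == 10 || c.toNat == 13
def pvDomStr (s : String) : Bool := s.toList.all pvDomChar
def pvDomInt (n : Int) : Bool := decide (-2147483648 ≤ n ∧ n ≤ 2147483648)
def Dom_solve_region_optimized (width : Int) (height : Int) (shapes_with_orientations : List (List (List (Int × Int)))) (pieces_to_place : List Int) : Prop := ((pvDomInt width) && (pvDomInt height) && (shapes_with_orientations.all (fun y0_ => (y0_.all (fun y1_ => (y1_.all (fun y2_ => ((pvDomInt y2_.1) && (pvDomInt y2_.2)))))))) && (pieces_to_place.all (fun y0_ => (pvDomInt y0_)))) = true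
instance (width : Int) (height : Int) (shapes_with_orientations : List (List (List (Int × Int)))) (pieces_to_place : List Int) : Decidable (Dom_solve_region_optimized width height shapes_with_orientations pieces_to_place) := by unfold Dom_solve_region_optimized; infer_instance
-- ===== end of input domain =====

-- B restructures the solver: one index-building pass precomputes every in-bounds placement of
-- every shape orientation as an occupancy-bitmask, and the search then consumes the piece
-- multiset as (shape_id, remaining_count) pairs in id order over those tables (no flattened
-- piece list, no sorting, no mutable grid); the proof shows feasibility is invariant under
-- permuting the piece order (objective: alternative algorithmic decomposition).

-- ===== PORT A =====
def get_shape_dims (shape : List (Int × Int)) : Int × Int :=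
  match shape with
  | [] => (0, 0)
  | p :: rest =>
    -- max(x for x, y in shape) / max(y …): the running-max loop over first/rest
    let max_x := rest.foldl (fun a c => max a c.1) p.1
    let max_y := rest.foldl (fun a c => max a c.2) p.2
    (max_x + 1, max_y + 1)

def can_place (grid : List (List Bool)) (shape : List (Int × Int)) (pos_x pos_y width height : Int) : Bool :=
  -- early-return-False loop = List.all; grid[ny][nx] via pyGetD is exact here: it is only
  -- evaluated after the bounds test, and every grid A builds has height rows of width cells
  shape.all (fun c =>
    let nx := pos_x + c.1
    let ny := pos_y + c.2
    if nx < 0 ∨ width ≤ nx ∨ ny < 0 ∨ height ≤ ny then false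
    else !(PySem.List.pyGetD (PySem.List.pyGetD grid ny []) nx false))

-- grid[pos_y + y][pos_x + x] = b ; toNat is exact: call sites are guarded by can_place,
-- so the indices are nonnegative and in range
def set_cell (grid : List (List Bool)) (x y : Int) (b : Bool) : List (List Bool) :=
  grid.modify y.toNat (fun row => row.set x.toNat b)

def place_shape (grid : List (List Bool)) (shape : List (Int × Int)) (pos_x pos_y : Int) : List (List Bool) :=
  shape.foldl (fun g c => set_cell g (pos_x + c.1) (pos_y + c.2) true) grid

def remove_shape (grid : List (List Bool)) (shape : List (Int × Int)) (pos_x pos_y : Int) : List (List Bool) :=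
  shape.foldl (fun g c => set_cell g (pos_x + c.1) (pos_y + c.2) false) grid

-- the three nested 'for' loops of backtrack, threading the mutated grid and the early 'return True'
def px_loopA (k : List (List Bool) → Bool) (width height : Int) (shape : List (Int × Int)) (py : Int) :
    List Int → List (List Bool) → Bool × List (List Bool)
  | [], grid => (false, grid)
  | px :: rest, grid =>
    if can_place grid shape px py width height then
      let g1 := place_shape grid shape px py
      if k g1 then (true, g1)
      else px_loopA k width height shape py rest (remove_shape g1 shape px py)
    else px_loopA k width height shape py rest grid

def py_loopA (k : List (List Bool) → Bool) (width height : Int) (shape : List (Int × Int)) (shape_w : Int) :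
    List Int → List (List Bool) → Bool × List (List Bool)
  | [], grid => (false, grid)
  | py :: rest, grid =>
    let r := px_loopA k width height shape py (PySem.List.pyRange 0 (width - shape_w + 1) 1) grid
    if r.1 then r else py_loopA k width height shape shape_w rest r.2

def orient_loopA (k : List (List Bool) → Bool) (width height : Int) :
    List (List (Int × Int)) → List (List Bool) → Bool × List (List Bool)
  | [], grid => (false, grid)
  | shape :: rest, grid =>
    let dims := get_shape_dims shape
    let r := py_loopA k width height shape dims.1 (PySem.List.pyRange 0 (height - dims.2 + 1) 1) grid
    if r.1 then r else orient_loopA k width height rest r.2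

def backtrackA (width height : Int) (shapes : List (List (List (Int × Int)))) (pieces : List Int) :
    List Int → List (List Bool) → Bool
  | [], _ => true
  | piece_idx :: rest, grid =>
    let shape_id := PySem.List.pyGetD pieces piece_idx 0
    let orientations := PySem.List.pyGetD shapes shape_id []
    (orient_loopA (fun g => backtrackA width height shapes pieces rest g) width height orientations grid).1
termination_by l => l.length

def solve_region_optimized (width : Int) (height : Int) (shapes_with_orientations : List (List (List (Int × Int)))) (pieces_to_place : List Int) : Bool :=
  let grid := List.replicate height.toNat (List.replicate width.toNat false)
  let pieces := (PySem.List.enumerate pieces_to_place 0).foldl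
      (fun acc p => acc ++ (PySem.List.pyRange 0 p.2 1).map (fun _ => p.1)) []
  if pieces.isEmpty then true
  else
    let total_cells_needed := ((PySem.List.pyRange 0 (PySem.List.len pieces_to_place) 1).map
        (fun sid => PySem.List.len (PySem.List.pyGetD (PySem.List.pyGetD shapes_with_orientations sid []) 0 []) *
          PySem.List.pyGetD pieces_to_place sid 0)).sum
    let total_cells_available := width * height
    if total_cells_needed > total_cells_available then false
    else
      let pieces_sorted := PySem.List.sorted (PySem.List.pyRange 0 (PySem.List.len pieces) 1)
          (fun i => -(PySem.List.len (PySem.List.pyGetD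
            (PySem.List.pyGetD shapes_with_orientations (PySem.List.pyGetD pieces i 0) []) 0 [])))
      backtrackA width height shapes_with_orientations pieces pieces_sorted grid

-- ===== PORT B =====
-- B's innermost per-cell loop with the None sentinel (break = the fold stays none);
-- 1 << (ny*width+nx): the exponent is nonnegative whenever it is taken, so .toNat is exact
def maskOptB (width height px py : Int) (shape : List (Int × Int)) : Option Int :=
  shape.foldl (fun st c =>
    match st with
    | none => none
    | some m =>
      let nx := px + c.1
      let ny := py + c.2
      if 0 ≤ nx ∧ nx < width ∧ 0 ≤ ny ∧ ny < height then
        some (PySem.Int.bor m ((1 : Int) <<< (ny * width + nx).toNat))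
      else none) (some 0)

-- the index-building pass for one shape id: masks.append inside three loops = flatMap/filterMap
def masksB (width height : Int) (orients : List (List (Int × Int))) : List Int :=
  orients.flatMap (fun shape =>
    let dims : Int × Int :=
      match shape with
      | [] => (0, 0)
      | p :: r => (r.foldl (fun a c => max a c.1) p.1 + 1, r.foldl (fun a c => max a c.2) p.2 + 1)
    (PySem.List.pyRange 0 (height - dims.2 + 1) 1).flatMap (fun py =>
      (PySem.List.pyRange 0 (width - dims.1 + 1) 1).filterMap (fun px =>
        maskOptB width height px py shape)))

-- go(sid, left, grid): the sid/count index walk is carried as the remaining (table, count) pairs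
def goB : List (List Int × Int) → Int → Bool
  | [], _ => true
  | (masks, left) :: rest, grid =>
    if h : left ≤ 0 then goB rest grid
    else masks.any (fun m =>
      (PySem.Int.band grid m == 0) && goB ((masks, left - 1) :: rest) (PySem.Int.bor grid m))
termination_by l => (l.map (fun p => p.2.toNat + 1)).sum
decreasing_by
  · simp
  · simp; omega

def solve_region_optimized_alt (width : Int) (height : Int) (shapes_with_orientations : List (List (List (Int × Int)))) (pieces_to_place : List Int) : Bool :=
  if !(pieces_to_place.any (fun c => 0 < c)) then true
  else
    let needed := ((PySem.List.pyRange 0 (PySem.List.len pieces_to_place) 1).map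
        (fun sid => PySem.List.len (PySem.List.pyGetD (PySem.List.pyGetD shapes_with_orientations sid []) 0 []) *
          PySem.List.pyGetD pieces_to_place sid 0)).sum
    if needed > width * height then false
    else
      goB ((PySem.List.pyRange 0 (PySem.List.len pieces_to_place) 1).map
            (fun sid => (masksB width height (PySem.List.pyGetD shapes_with_orientations sid []),
                         PySem.List.pyGetD pieces_to_place sid 0))) 0

-- ===== PRECONDITION & SPEC =====
-- Pre_ excludes exactly the inputs on which the Python A raises IndexError: when some piece
-- count is positive, the total-cells sum (and the sort key) reads shapes_with_orientations[sid][0]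
-- for every sid < len(pieces_to_place), so each such sid must index an existing, nonempty
-- orientation list.  (If no count is positive, A returns True before touching the shapes.)
def Pre_solve_region_optimized (width : Int) (height : Int) (shapes_with_orientations : List (List (List (Int × Int)))) (pieces_to_place : List Int) : Prop :=
  (∃ c ∈ pieces_to_place, 0 < c) →
    (pieces_to_place.length ≤ shapes_with_orientations.length ∧
      ∀ o ∈ shapes_with_orientations.take pieces_to_place.length, o ≠ [])
instance (width : Int) (height : Int) (shapes_with_orientations : List (List (List (Int × Int)))) (pieces_to_place : List Int) : Decidable (Pre_solve_region_optimized width height shapes_with_orientations pieces_to_place) := by unfold Pre_solve_region_optimized; infer_instance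

def pvWitness_solve_region_optimized : Int × Int × (List (List (List (Int × Int)))) × List Int :=
  (2, 2, [[[(0, 0)]]], [1])

def Spec_solve_region_optimized (width : Int) (height : Int) (shapes_with_orientations : List (List (List (Int × Int)))) (pieces_to_place : List Int) (out : Bool) : Prop := out = solve_region_optimized_alt width height shapes_with_orientations pieces_to_place
instance (width : Int) (height : Int) (shapes_with_orientations : List (List (List (Int × Int)))) (pieces_to_place : List Int) (out : Bool) : Decidable (Spec_solve_region_optimized width height shapes_with_orientations pieces_to_place out) := by unfold Spec_solve_region_optimized; infer_instance

-- ===== CLAIM (what is proved, stated in full; the proofs are below) =====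
def Claim_equal_solve_region_optimized : Prop := ∀ (width : Int) (height : Int) (shapes_with_orientations : List (List (List (Int × Int)))) (pieces_to_place : List Int), Dom_solve_region_optimized width height shapes_with_orientations pieces_to_place → Pre_solve_region_optimized width height shapes_with_orientations pieces_to_place → Spec_solve_region_optimized width height shapes_with_orientations pieces_to_place (solve_region_optimized width height shapes_with_orientations pieces_to_place)

-- ===== LEMMAS AND PROOFS =====

-- A-side intermediate form: the recursion over the ordered list of shape ids with the
-- placement enumeration inline (what pv_backtrack characterises backtrackA as)
def pvMaskPair (width height px py : Int) (shape : List (Int × Int)) : Bool × Int :=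
  shape.foldl (fun st c =>
    if st.1 then
      let nx := px + c.1
      let ny := py + c.2
      if 0 ≤ nx ∧ nx < width ∧ 0 ≤ ny ∧ ny < height then
        (true, PySem.Int.bor st.2 ((1 : Int) <<< (ny * width + nx).toNat))
      else (false, st.2)
    else st) (true, 0)

def pvSearch (width height : Int) (shapes : List (List (List (Int × Int)))) :
    List Int → Int → Bool
  | [], _ => true
  | sid :: rest, grid =>
    (PySem.List.pyGetD shapes sid []).any (fun shape =>
      let dims : Int × Int :=
        match shape with
        | [] => (0, 0)
        | p :: r => (r.foldl (fun a c => max a c.1) p.1 + 1, r.foldl (fun a c => max a c.2) p.2 + 1)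
      (PySem.List.pyRange 0 (height - dims.2 + 1) 1).any (fun py =>
        (PySem.List.pyRange 0 (width - dims.1 + 1) 1).any (fun px =>
          let r := pvMaskPair width height px py shape
          r.1 && ((PySem.Int.band grid r.2 == 0) &&
            pvSearch width height shapes rest (PySem.Int.bor grid r.2)))))
termination_by l => l.length

-- well-formed grid: height rows, each of width cells
def pvWF (width height : Int) (g : List (List Bool)) : Prop :=
  g.length = height.toNat ∧ ∀ (i : Nat) (h : i < g.length), g[i].length = width.toNat

-- the cell read exactly as can_place reads it
def pvCell (g : List (List Bool)) (x y : Int) : Bool :=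
  PySem.List.pyGetD (PySem.List.pyGetD g y []) x false

abbrev pvLegal (width height x y : Int) : Prop := 0 ≤ x ∧ x < width ∧ 0 ≤ y ∧ y < height

-- the grid ↔ occupancy-integer simulation relation
def pvRel (width height : Int) (g : List (List Bool)) (m : Int) : Prop :=
  pvWF width height g ∧ 0 ≤ m ∧
    ∀ x y : Int, pvLegal width height x y →
      pvCell g x y = m.toNat.testBit ((y * width + x).toNat)

-- absolute cells covered by a placement
def pvCells (shape : List (Int × Int)) (px py : Int) : List (Int × Int) :=
  shape.map (fun c => (px + c.1, py + c.2))

-- Nat-level OR-accumulation of the cells' bits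
def pvEncMaskN (width : Int) (cells : List (Int × Int)) (n : Nat) : Nat :=
  cells.foldl (fun a c => a ||| ((1 : Nat) <<< ((c.2 * width + c.1).toNat))) n

lemma pv_and_eq_zero_iff (x y : Nat) : x &&& y = 0 ↔ ∀ i, ¬(x.testBit i ∧ y.testBit i) := by
  constructor
  · intro h i hi
    have := congrArg (fun z => Nat.testBit z i) h
    simp [Nat.testBit_and, hi.1, hi.2] at this
  · intro h
    apply Nat.eq_of_testBit_eq
    intro i
    simp only [Nat.testBit_and, Nat.zero_testBit]
    by_cases hx : x.testBit i
    · by_cases hy : y.testBit i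
      · exact absurd ⟨hx, hy⟩ (h i)
      · simp [hx, hy]
    · simp [hx]

lemma pv_encMaskN_testBit (width : Int) (cells : List (Int × Int)) (n : Nat) (i : Nat) :
    (pvEncMaskN width cells n).testBit i
      = (n.testBit i || cells.any (fun c => (c.2 * width + c.1).toNat == i)) := by
  induction cells generalizing n with
  | nil => simp [pvEncMaskN]
  | cons c t ih =>
    simp only [pvEncMaskN, List.foldl_cons, List.any_cons] at *
    rw [ih]
    have hbit : ∀ j : Nat, ((1:Nat) <<< (c.2 * width + c.1).toNat).testBit j
        = decide (j = (c.2 * width + c.1).toNat) := by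
      intro j
      rw [Nat.one_shiftLeft]
      simp [Nat.testBit_two_pow, eq_comm]
    simp only [Nat.testBit_or, hbit]
    by_cases h : (c.2 * width + c.1).toNat = i
    · simp [h]
    · have hf : ((c.2 * width + c.1).toNat == i) = false := by simpa using h
      simp [hf, Ne.symm h]

lemma pv_enc_inj {width height x y x' y' : Int} (h1 : pvLegal width height x y)
    (h2 : pvLegal width height x' y') (h : (y * width + x).toNat = (y' * width + x').toNat) :
    x = x' ∧ y = y' := by
  obtain ⟨hx0, hxw, hy0, hyh⟩ := h1
  obtain ⟨hx0', hxw', hy0', hyh'⟩ := h2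
  have hw : 0 < width := lt_of_le_of_lt hx0 hxw
  have e1 : y * width + x = ((y.toNat * width.toNat + x.toNat : Nat) : Int) := by
    push_cast [Int.toNat_of_nonneg hx0, Int.toNat_of_nonneg hy0, Int.toNat_of_nonneg (le_of_lt hw)]
    ring
  have e2 : y' * width + x' = ((y'.toNat * width.toNat + x'.toNat : Nat) : Int) := by
    push_cast [Int.toNat_of_nonneg hx0', Int.toNat_of_nonneg hy0', Int.toNat_of_nonneg (le_of_lt hw)]
    ring
  rw [e1, e2, Int.toNat_natCast, Int.toNat_natCast] at h
  have hxw2 : x.toNat < width.toNat := by omega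
  have hxw2' : x'.toNat < width.toNat := by omega
  have hw0 : 0 < width.toNat := by omega
  have hx : x.toNat = x'.toNat := by
    have := congrArg (fun n => n % width.toNat) h
    simpa [Nat.mul_add_mod, Nat.mod_eq_of_lt hxw2, Nat.mod_eq_of_lt hxw2'] using this
  have hy : y.toNat = y'.toNat := by
    have hmul : y.toNat * width.toNat = y'.toNat * width.toNat := by omega
    exact Nat.eq_of_mul_eq_mul_right hw0 hmul
  omega

-- pvMaskPair's fold with a general start state, for induction
def pvMaskFold (width height px py : Int) (shape : List (Int × Int)) (st : Bool × Int) : Bool × Int :=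
  shape.foldl (fun st c =>
    if st.1 then
      let nx := px + c.1
      let ny := py + c.2
      if 0 ≤ nx ∧ nx < width ∧ 0 ≤ ny ∧ ny < height then
        (true, PySem.Int.bor st.2 ((1 : Int) <<< (ny * width + nx).toNat))
      else (false, st.2)
    else st) st

lemma pv_maskFold_eq (width height px py : Int) (shape : List (Int × Int)) :
    pvMaskPair width height px py shape = pvMaskFold width height px py shape (true, 0) := rfl

lemma pv_maskFold_false (width height px py : Int) (shape : List (Int × Int)) (m : Int) :
    pvMaskFold width height px py shape (false, m) = (false, m) := by
  induction shape with
  | nil => rfl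
  | cons c t ih => simpa [pvMaskFold] using ih

lemma pv_maskFold_fst (width height px py : Int) (shape : List (Int × Int)) :
    ∀ m : Int, (pvMaskFold width height px py shape (true, m)).1
      = shape.all (fun c => decide (pvLegal width height (px + c.1) (py + c.2))) := by
  induction shape with
  | nil => intro m; rfl
  | cons c t ih =>
    intro m
    by_cases h : pvLegal width height (px + c.1) (py + c.2)
    · simpa [pvMaskFold, h, pvLegal] using ih _
    · have : pvMaskFold width height px py (c :: t) (true, m)
          = pvMaskFold width height px py t (false, m) := by
        simp [pvMaskFold, h]
      rw [this, pv_maskFold_false]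
      simp [h]

lemma pv_maskFold_snd (width height px py : Int) (shape : List (Int × Int))
    (h : ∀ c ∈ shape, pvLegal width height (px + c.1) (py + c.2)) :
    ∀ n : Nat, (pvMaskFold width height px py shape (true, (n : Int))).2
      = ((pvEncMaskN width (pvCells shape px py) n : Nat) : Int) := by
  induction shape with
  | nil => intro n; rfl
  | cons c t ih =>
    intro n
    have hc := h c (by simp)
    have hstep : pvMaskFold width height px py (c :: t) (true, (n : Int))
        = pvMaskFold width height px py t
            (true, PySem.Int.bor (n : Int) ((1 : Int) <<< ((py + c.2) * width + (px + c.1)).toNat)) := by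
      simp [pvMaskFold, hc]
    rw [hstep]
    have hcast : PySem.Int.bor (n : Int) ((1 : Int) <<< ((py + c.2) * width + (px + c.1)).toNat)
        = ((n ||| (1 : Nat) <<< ((py + c.2) * width + (px + c.1)).toNat : Nat) : Int) := by
      have h1 : (((1 : Nat) <<< ((py + c.2) * width + (px + c.1)).toNat : Nat) : Int)
          = (1 : Int) <<< ((py + c.2) * width + (px + c.1)).toNat := by
        exact_mod_cast Int.natCast_shiftLeft 1 _
      rw [← h1, PySem.Int.bor_natCast]
    rw [hcast, ih (fun c hc => h c (by simp [hc]))]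
    simp [pvEncMaskN, pvCells]

lemma pv_maskof_fst (width height px py : Int) (shape : List (Int × Int)) :
    (pvMaskPair width height px py shape).1
      = shape.all (fun c => decide (pvLegal width height (px + c.1) (py + c.2))) := by
  rw [pv_maskFold_eq, pv_maskFold_fst]

lemma pv_maskof_snd (width height px py : Int) (shape : List (Int × Int))
    (h : ∀ c ∈ shape, pvLegal width height (px + c.1) (py + c.2)) :
    (pvMaskPair width height px py shape).2 = ((pvEncMaskN width (pvCells shape px py) 0 : Nat) : Int) := by
  rw [pv_maskFold_eq]
  exact_mod_cast pv_maskFold_snd width height px py shape h 0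

-- cell reads through the well-formedness facts
lemma pv_cell_eq_getElem {width height : Int} {g : List (List Bool)} (hwf : pvWF width height g)
    {x y : Int} (hl : pvLegal width height x y) :
    ∃ (hy : y.toNat < g.length) (hx : x.toNat < g[y.toNat].length),
      pvCell g x y = g[y.toNat][x.toNat] := by
  obtain ⟨hlen, hrow⟩ := hwf
  obtain ⟨hx0, hxw, hy0, hyh⟩ := hl
  have hy : y.toNat < g.length := by omega
  have hx : x.toNat < g[y.toNat].length := by rw [hrow _ hy]; omega
  refine ⟨hy, hx, ?_⟩
  rw [pvCell, PySem.List.pyGetD_eq_getElem g [] hy0 (by omega),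
      PySem.List.pyGetD_eq_getElem _ false hx0 (by have := hrow _ hy; omega)]

lemma pv_set_cell_WF {width height : Int} {g : List (List Bool)} (hwf : pvWF width height g)
    (x y : Int) (b : Bool) : pvWF width height (set_cell g x y b) := by
  obtain ⟨hlen, hrow⟩ := hwf
  refine ⟨by simpa [set_cell] using hlen, ?_⟩
  intro i hi
  have hi' : i < g.length := by simpa [set_cell] using hi
  simp only [set_cell, List.getElem_modify]
  split
  · rw [List.length_set]; exact hrow _ hi'
  · exact hrow _ hi'

lemma pv_set_cell_cell {width height : Int} {g : List (List Bool)} (hwf : pvWF width height g)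
    {x y : Int} (hl : pvLegal width height x y) (b : Bool)
    {x' y' : Int} (hl' : pvLegal width height x' y') :
    pvCell (set_cell g x y b) x' y' = if x' = x ∧ y' = y then b else pvCell g x' y' := by
  obtain ⟨hy1, hx1, e1⟩ := pv_cell_eq_getElem (pv_set_cell_WF hwf x y b) hl'
  obtain ⟨hy2, hx2, e2⟩ := pv_cell_eq_getElem hwf hl'
  rw [e1, e2]
  simp only [set_cell, List.getElem_modify]
  obtain ⟨ha, hb, hc, hd⟩ := hl
  obtain ⟨ha', hb', hc', hd'⟩ := hl'
  split
  · next hyt =>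
    have hyy : y' = y := by omega
    rw [List.getElem_set]
    split
    · next hxt =>
      have hxx : x' = x := by omega
      simp [hxx, hyy]
    · next hxt =>
      have hxx : ¬(x' = x) := by
        intro hc2
        apply hxt
        omega
      simp [hxx]
  · next hyt =>
    have hyy : ¬(y' = y) := by
      intro hc2
      apply hyt
      omega
    simp [hyy]

lemma pv_setMany_WF {width height : Int} (cells : List (Int × Int)) (b : Bool) :
    ∀ (g : List (List Bool)), pvWF width height g →
      pvWF width height (cells.foldl (fun g c => set_cell g c.1 c.2 b) g) := by
  induction cells with
  | nil => intro g hg; exact hg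
  | cons c t ih => intro g hg; exact ih _ (pv_set_cell_WF hg _ _ _)

lemma pv_setMany_cell {width height : Int} (cells : List (Int × Int)) (b : Bool)
    (hcl : ∀ c ∈ cells, pvLegal width height c.1 c.2) :
    ∀ (g : List (List Bool)), pvWF width height g →
      ∀ {x y : Int}, pvLegal width height x y →
        pvCell (cells.foldl (fun g c => set_cell g c.1 c.2 b) g) x y
          = if (x, y) ∈ cells then b else pvCell g x y := by
  induction cells with
  | nil => intro g hg x y hl; simp
  | cons c t ih =>
    intro g hg x y hl
    have hc := hcl c (by simp)
    rw [List.foldl_cons, ih (fun c hm => hcl c (by simp [hm])) _ (pv_set_cell_WF hg _ _ _) hl,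
        pv_set_cell_cell hg hc b hl]
    by_cases hm : (x, y) ∈ t
    · simp [hm]
    · by_cases he : (x, y) = c
      · have : x = c.1 ∧ y = c.2 := by rw [← he]; exact ⟨rfl, rfl⟩
        simp [he, this]
      · have : ¬(x = c.1 ∧ y = c.2) := by
          intro hc2
          exact he (Prod.ext hc2.1 hc2.2)
        simp [hm, he, this]

lemma pv_grid_ext {width height : Int} {g g' : List (List Bool)} (hwf : pvWF width height g)
    (hwf' : pvWF width height g')
    (h : ∀ x y : Int, pvLegal width height x y → pvCell g x y = pvCell g' x y) : g = g' := by
  obtain ⟨hlen, hrow⟩ := hwf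
  obtain ⟨hlen', hrow'⟩ := hwf'
  apply List.ext_getElem (by omega)
  intro i hi hi'
  apply List.ext_getElem (by rw [hrow _ hi, hrow' _ hi'])
  intro j hj hj'
  have hW : (j : Int) < width := by
    have := hrow _ hi
    omega
  have hH : (i : Int) < height := by omega
  have hl : pvLegal width height (j : Int) (i : Int) := ⟨by omega, hW, by omega, hH⟩
  obtain ⟨_, _, e1⟩ := pv_cell_eq_getElem ⟨hlen, hrow⟩ hl
  obtain ⟨_, _, e2⟩ := pv_cell_eq_getElem ⟨hlen', hrow'⟩ hl
  have := h _ _ hl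
  rw [e1, e2] at this
  simpa using this

lemma pv_place_eq (g : List (List Bool)) (shape : List (Int × Int)) (px py : Int) :
    place_shape g shape px py = (pvCells shape px py).foldl (fun g c => set_cell g c.1 c.2 true) g := by
  rw [pvCells, List.foldl_map]
  rfl

lemma pv_remove_eq (g : List (List Bool)) (shape : List (Int × Int)) (px py : Int) :
    remove_shape g shape px py = (pvCells shape px py).foldl (fun g c => set_cell g c.1 c.2 false) g := by
  rw [pvCells, List.foldl_map]
  rfl

lemma pv_canplace_core {width height : Int} {g : List (List Bool)} {m : Int}
    (hrel : pvRel width height g m) (px py : Int) (shape : List (Int × Int)) :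
    can_place g shape px py width height
      = (shape.all (fun c => decide (pvLegal width height (px + c.1) (py + c.2)))
          && shape.all (fun c => !m.toNat.testBit (((py + c.2) * width + (px + c.1)).toNat))) := by
  induction shape with
  | nil => rfl
  | cons c t ih =>
    simp only [can_place, List.all_cons] at *
    rw [ih]
    by_cases h : pvLegal width height (px + c.1) (py + c.2)
    · obtain ⟨h1, h2, h3, h4⟩ := h
      have hcond : ¬(px + c.1 < 0 ∨ width ≤ px + c.1 ∨ py + c.2 < 0 ∨ height ≤ py + c.2) := by omega
      have hcell := hrel.2.2 (px + c.1) (py + c.2) ⟨h1, h2, h3, h4⟩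
      rw [pvCell] at hcell
      simp only [if_neg hcond, hcell]
      have hd : decide (pvLegal width height (px + c.1) (py + c.2)) = true := by
        simp [pvLegal]
        omega
      rw [hd]
      cases m.toNat.testBit (((py + c.2) * width + (px + c.1)).toNat) <;>
        cases t.all (fun c => decide (pvLegal width height (px + c.1) (py + c.2))) <;>
        cases t.all (fun c => !m.toNat.testBit (((py + c.2) * width + (px + c.1)).toNat)) <;> rfl
    · have hcond : (px + c.1 < 0 ∨ width ≤ px + c.1 ∨ py + c.2 < 0 ∨ height ≤ py + c.2) := by
        simp [pvLegal] at h
        omega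
      have hd : decide (pvLegal width height (px + c.1) (py + c.2)) = false := by
        simp only [pvLegal, decide_eq_false_iff_not]
        omega
      simp [if_pos hcond, hd]

lemma pv_band_encMask {m : Int} (hm : 0 ≤ m) (width : Int) (cells : List (Int × Int)) :
    (PySem.Int.band m ((pvEncMaskN width cells 0 : Nat) : Int) == 0)
      = cells.all (fun c => !m.toNat.testBit ((c.2 * width + c.1).toNat)) := by
  have hb : PySem.Int.band m ((pvEncMaskN width cells 0 : Nat) : Int)
      = ((m.toNat &&& pvEncMaskN width cells 0 : Nat) : Int) := by
    conv_lhs => rw [← Int.toNat_of_nonneg hm]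
    rw [PySem.Int.band_natCast]
  rw [hb]
  rw [Bool.eq_iff_iff]
  simp only [beq_iff_eq, List.all_eq_true]
  rw [show ((m.toNat &&& pvEncMaskN width cells 0 : Nat) : Int) = 0 ↔ m.toNat &&& pvEncMaskN width cells 0 = 0 by exact_mod_cast Int.natCast_eq_zero]
  rw [pv_and_eq_zero_iff]
  constructor
  · intro h c hc
    have := h ((c.2 * width + c.1).toNat)
    simp only [pv_encMaskN_testBit, Nat.zero_testBit, Bool.false_or] at this
    have hany : cells.any (fun c' => (c'.2 * width + c'.1).toNat == (c.2 * width + c.1).toNat) = true := by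
      rw [List.any_eq_true]
      refine ⟨c, hc, ?_⟩
      simp
    simp only [hany] at this
    simp only [Bool.not_eq_eq_eq_not, Bool.not_true]
    by_contra hbit
    exact this ⟨by simpa using hbit, trivial⟩
  · intro h i hi
    obtain ⟨hbm, hbe⟩ := hi
    rw [pv_encMaskN_testBit] at hbe
    simp only [Nat.zero_testBit, Bool.false_or, List.any_eq_true] at hbe
    obtain ⟨c, hc, he⟩ := hbe
    have := h c hc
    simp only [beq_iff_eq] at he
    rw [he] at this
    simp [hbm] at this

lemma pv_canplace {width height : Int} {g : List (List Bool)} {m : Int}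
    (hrel : pvRel width height g m) (px py : Int) (shape : List (Int × Int)) :
    can_place g shape px py width height
      = ((pvMaskPair width height px py shape).1
          && (PySem.Int.band m (pvMaskPair width height px py shape).2 == 0)) := by
  rw [pv_canplace_core hrel, pv_maskof_fst]
  by_cases h : shape.all (fun c => decide (pvLegal width height (px + c.1) (py + c.2))) = true
  · have hleg : ∀ c ∈ shape, pvLegal width height (px + c.1) (py + c.2) := by
      intro c hc
      have := (List.all_eq_true.mp h) c hc
      simpa using this
    rw [h, pv_maskof_snd width height px py shape hleg, pv_band_encMask hrel.2.1]
    simp only [Bool.true_and]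
    rw [pvCells, List.all_map]
    rfl
  · rw [Bool.not_eq_true] at h
    rw [h]
    rw [Bool.false_and, Bool.false_and]

lemma pv_place_rel {width height : Int} {g : List (List Bool)} {m : Int}
    (hrel : pvRel width height g m) {shape : List (Int × Int)} {px py : Int}
    (hleg : ∀ c ∈ shape, pvLegal width height (px + c.1) (py + c.2)) :
    pvRel width height (place_shape g shape px py)
      (PySem.Int.bor m (pvMaskPair width height px py shape).2) := by
  obtain ⟨hwf, hm0, hcell⟩ := hrel
  have hcl : ∀ c ∈ pvCells shape px py, pvLegal width height c.1 c.2 := by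
    intro c hc
    rw [pvCells, List.mem_map] at hc
    obtain ⟨a, ha, rfl⟩ := hc
    exact hleg a ha
  have hsnd := pv_maskof_snd width height px py shape hleg
  have hbor : PySem.Int.bor m (pvMaskPair width height px py shape).2
      = ((m.toNat ||| pvEncMaskN width (pvCells shape px py) 0 : Nat) : Int) := by
    rw [hsnd]
    conv_lhs => rw [← Int.toNat_of_nonneg hm0]
    rw [PySem.Int.bor_natCast]
  refine ⟨?_, ?_, ?_⟩
  · rw [pv_place_eq]
    exact pv_setMany_WF _ _ _ hwf
  · rw [hbor]
    exact Int.natCast_nonneg _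
  · intro x y hl
    rw [pv_place_eq,
        pv_setMany_cell _ _ hcl _ hwf hl, hbor]
    simp only [Int.toNat_natCast, Nat.testBit_or, pv_encMaskN_testBit, Nat.zero_testBit,
      Bool.false_or]
    by_cases hmem : (x, y) ∈ pvCells shape px py
    · have hany : (pvCells shape px py).any
          (fun c => (c.2 * width + c.1).toNat == ((y * width + x)).toNat) = true := by
        rw [List.any_eq_true]
        refine ⟨(x, y), hmem, ?_⟩
        simp
      simp [hmem, hany]
    · have hany : (pvCells shape px py).any
          (fun c => (c.2 * width + c.1).toNat == ((y * width + x)).toNat) = false := by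
        rw [Bool.eq_false_iff]
        intro hc
        rw [List.any_eq_true] at hc
        obtain ⟨c, hc1, hc2⟩ := hc
        simp only [beq_iff_eq] at hc2
        obtain ⟨hx, hy⟩ := pv_enc_inj (hcl c hc1) hl hc2
        apply hmem
        have : c = (x, y) := Prod.ext hx hy
        rwa [← this]
      simp [hmem, hany, hcell x y hl]

lemma pv_restore {width height : Int} {g : List (List Bool)} {m : Int}
    (hrel : pvRel width height g m) {shape : List (Int × Int)} {px py : Int}
    (hcp : can_place g shape px py width height = true) :
    remove_shape (place_shape g shape px py) shape px py = g := by
  have hcore := pv_canplace_core hrel px py shape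
  rw [hcp] at hcore
  have hall : shape.all (fun c => decide (pvLegal width height (px + c.1) (py + c.2))) = true := by
    cases hh : shape.all (fun c => decide (pvLegal width height (px + c.1) (py + c.2)))
    · rw [hh] at hcore; simp at hcore
    · rfl
  have hfree : shape.all
      (fun c => !m.toNat.testBit (((py + c.2) * width + (px + c.1)).toNat)) = true := by
    cases hh : shape.all (fun c => !m.toNat.testBit (((py + c.2) * width + (px + c.1)).toNat))
    · rw [hh, Bool.and_false] at hcore; exact absurd hcore.symm (by simp)
    · rfl
  obtain ⟨hwf, hm0, hcell⟩ := hrel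
  have hleg : ∀ c ∈ shape, pvLegal width height (px + c.1) (py + c.2) := by
    intro c hc
    have := List.all_eq_true.mp hall c hc
    simpa using this
  have hcl : ∀ c ∈ pvCells shape px py, pvLegal width height c.1 c.2 := by
    intro c hc
    rw [pvCells, List.mem_map] at hc
    obtain ⟨a, ha, rfl⟩ := hc
    exact hleg a ha
  have hgfree : ∀ c ∈ pvCells shape px py, pvCell g c.1 c.2 = false := by
    intro c hc
    rw [pvCells, List.mem_map] at hc
    obtain ⟨a, ha, rfl⟩ := hc
    have hb := List.all_eq_true.mp hfree a ha
    have := hcell (px + a.1) (py + a.2) (hleg a ha)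
    rw [this]
    simpa using hb
  have hwf1 : pvWF width height (place_shape g shape px py) := by
    rw [pv_place_eq]
    exact pv_setMany_WF _ _ _ hwf
  apply pv_grid_ext ?_ hwf
  · intro x y hl
    rw [pv_remove_eq,
        pv_setMany_cell _ _ hcl _ hwf1 hl,
        pv_place_eq,
        pv_setMany_cell _ _ hcl _ hwf hl]
    by_cases hmem : (x, y) ∈ pvCells shape px py
    · simp only [hmem, if_true]
      exact (hgfree _ hmem).symm
    · simp [hmem]
  · rw [pv_remove_eq]
    exact pv_setMany_WF _ _ _ hwf1

lemma pv_dims_eq (shape : List (Int × Int)) :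
    (match shape with
      | [] => ((0 : Int), (0 : Int))
      | p :: rest => (rest.foldl (fun a c => max a c.1) p.1 + 1, rest.foldl (fun a c => max a c.2) p.2 + 1))
      = get_shape_dims shape := by
  cases shape <;> rfl

lemma pv_px_loop {width height : Int} {k : List (List Bool) → Bool} {kb : Int → Bool}
    (hk : ∀ g' m', pvRel width height g' m' → k g' = kb m')
    (shape : List (Int × Int)) (py : Int) (pxs : List Int)
    {g : List (List Bool)} {m : Int} (hrel : pvRel width height g m) :
    (px_loopA k width height shape py pxs g).1
      = pxs.any (fun px =>
          (pvMaskPair width height px py shape).1 &&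
            ((PySem.Int.band m (pvMaskPair width height px py shape).2 == 0) &&
              kb (PySem.Int.bor m (pvMaskPair width height px py shape).2)))
    ∧ ((px_loopA k width height shape py pxs g).1 = false →
        (px_loopA k width height shape py pxs g).2 = g) := by
  induction pxs with
  | nil => simp [px_loopA]
  | cons px rest ih =>
    have hcp := pv_canplace hrel px py shape
    rw [List.any_cons]
    cases hfst : (pvMaskPair width height px py shape).1 with
    | false =>
      have hcpf : can_place g shape px py width height = false := by
        rw [hcp, hfst, Bool.false_and]
      have hstep : px_loopA k width height shape py (px :: rest) g
          = px_loopA k width height shape py rest g := by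
        simp only [px_loopA, hcpf]
        simp
      rw [hstep, Bool.false_and, Bool.false_or]
      exact ih
    | true =>
      cases hband : (PySem.Int.band m (pvMaskPair width height px py shape).2 == 0) with
      | false =>
        have hcpf : can_place g shape px py width height = false := by
          rw [hcp, hfst, hband, Bool.true_and]
        have hstep : px_loopA k width height shape py (px :: rest) g
            = px_loopA k width height shape py rest g := by
          simp only [px_loopA, hcpf]
          simp
        rw [hstep, Bool.false_and, Bool.true_and, Bool.false_or]
        exact ih
      | true =>
        have hcpt : can_place g shape px py width height = true := by
          rw [hcp, hfst, hband, Bool.true_and]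
        have hleg : ∀ c ∈ shape, pvLegal width height (px + c.1) (py + c.2) := by
          intro c hc
          rw [pv_maskof_fst] at hfst
          have := List.all_eq_true.mp hfst c hc
          simpa using this
        have hrel1 := pv_place_rel hrel hleg
        have hk1 := hk _ _ hrel1
        rw [Bool.true_and, Bool.true_and]
        cases hkb : kb (PySem.Int.bor m (pvMaskPair width height px py shape).2) with
        | true =>
          have hstep : px_loopA k width height shape py (px :: rest) g
              = (true, place_shape g shape px py) := by
            simp only [px_loopA, hcpt, if_true, hk1, hkb]
          rw [hstep]
          simp
        | false =>
          have hres := pv_restore hrel hcpt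
          have hstep : px_loopA k width height shape py (px :: rest) g
              = px_loopA k width height shape py rest g := by
            simp only [px_loopA, hcpt, if_true, hk1, hkb]
            simp only [Bool.false_eq_true, if_false, hres]
          rw [hstep, Bool.false_or]
          exact ih

lemma pv_py_loop {width height : Int} {k : List (List Bool) → Bool} {kb : Int → Bool}
    (hk : ∀ g' m', pvRel width height g' m' → k g' = kb m')
    (shape : List (Int × Int)) (shape_w : Int) (pys : List Int)
    {g : List (List Bool)} {m : Int} (hrel : pvRel width height g m) :
    (py_loopA k width height shape shape_w pys g).1
      = pys.any (fun py =>
          (PySem.List.pyRange 0 (width - shape_w + 1) 1).any (fun px =>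
            (pvMaskPair width height px py shape).1 &&
              ((PySem.Int.band m (pvMaskPair width height px py shape).2 == 0) &&
                kb (PySem.Int.bor m (pvMaskPair width height px py shape).2))))
    ∧ ((py_loopA k width height shape shape_w pys g).1 = false →
        (py_loopA k width height shape shape_w pys g).2 = g) := by
  induction pys with
  | nil => simp [py_loopA]
  | cons py rest ih =>
    obtain ⟨hpx1, hpx2⟩ := pv_px_loop hk shape py (PySem.List.pyRange 0 (width - shape_w + 1) 1) hrel
    rw [List.any_cons]
    cases hr : (px_loopA k width height shape py (PySem.List.pyRange 0 (width - shape_w + 1) 1) g).1 with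
    | true =>
      have hstep : py_loopA k width height shape shape_w (py :: rest) g
          = px_loopA k width height shape py (PySem.List.pyRange 0 (width - shape_w + 1) 1) g := by
        simp only [py_loopA, hr]
        simp
      rw [hstep, hr, ← hpx1, hr]
      simp
    | false =>
      have hg := hpx2 hr
      have hstep : py_loopA k width height shape shape_w (py :: rest) g
          = py_loopA k width height shape shape_w rest g := by
        simp only [py_loopA, hr]
        simp [hg]
      rw [hstep, ← hpx1, hr, Bool.false_or]
      exact ih

lemma pv_orient_loop {width height : Int} {k : List (List Bool) → Bool} {kb : Int → Bool}
    (hk : ∀ g' m', pvRel width height g' m' → k g' = kb m')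
    (orients : List (List (Int × Int)))
    {g : List (List Bool)} {m : Int} (hrel : pvRel width height g m) :
    (orient_loopA k width height orients g).1
      = orients.any (fun shape =>
          (PySem.List.pyRange 0 (height - (get_shape_dims shape).2 + 1) 1).any (fun py =>
            (PySem.List.pyRange 0 (width - (get_shape_dims shape).1 + 1) 1).any (fun px =>
              (pvMaskPair width height px py shape).1 &&
                ((PySem.Int.band m (pvMaskPair width height px py shape).2 == 0) &&
                  kb (PySem.Int.bor m (pvMaskPair width height px py shape).2)))))
    ∧ ((orient_loopA k width height orients g).1 = false →
        (orient_loopA k width height orients g).2 = g) := by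
  induction orients with
  | nil => simp [orient_loopA]
  | cons shape rest ih =>
    obtain ⟨hpy1, hpy2⟩ := pv_py_loop hk shape (get_shape_dims shape).1
      (PySem.List.pyRange 0 (height - (get_shape_dims shape).2 + 1) 1) hrel
    rw [List.any_cons]
    cases hr : (py_loopA k width height shape (get_shape_dims shape).1
        (PySem.List.pyRange 0 (height - (get_shape_dims shape).2 + 1) 1) g).1 with
    | true =>
      have hstep : orient_loopA k width height (shape :: rest) g
          = py_loopA k width height shape (get_shape_dims shape).1
              (PySem.List.pyRange 0 (height - (get_shape_dims shape).2 + 1) 1) g := by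
        simp only [orient_loopA, hr]
        simp
      rw [hstep, hr, ← hpy1, hr]
      simp
    | false =>
      have hg := hpy2 hr
      have hstep : orient_loopA k width height (shape :: rest) g
          = orient_loopA k width height rest g := by
        simp only [orient_loopA, hr]
        simp [hg]
      rw [hstep, ← hpy1, hr, Bool.false_or]
      exact ih

lemma pv_backtrack (width height : Int) (shapes : List (List (List (Int × Int)))) (pieces : List Int) :
    ∀ (idxs : List Int) {g : List (List Bool)} {m : Int}, pvRel width height g m →
      backtrackA width height shapes pieces idxs g
        = pvSearch width height shapes (idxs.map (fun i => PySem.List.pyGetD pieces i 0)) m := by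
  intro idxs
  induction idxs with
  | nil =>
    intro g m _
    simp [backtrackA, pvSearch]
  | cons i rest ih =>
    intro g m hrel
    have hk : ∀ g' m', pvRel width height g' m' →
        backtrackA width height shapes pieces rest g'
          = pvSearch width height shapes (rest.map (fun i => PySem.List.pyGetD pieces i 0)) m' := by
      intro g' m' hrel'
      exact ih hrel'
    have hA : backtrackA width height shapes pieces (i :: rest) g
        = (orient_loopA (fun g' => backtrackA width height shapes pieces rest g') width height
            (PySem.List.pyGetD shapes (PySem.List.pyGetD pieces i 0) []) g).1 := by
      simp [backtrackA]
    rw [List.map_cons, hA]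
    have hB : pvSearch width height shapes
        ((PySem.List.pyGetD pieces i 0) :: rest.map (fun i => PySem.List.pyGetD pieces i 0)) m
        = (PySem.List.pyGetD shapes (PySem.List.pyGetD pieces i 0) []).any (fun shape =>
            (PySem.List.pyRange 0 (height - (get_shape_dims shape).2 + 1) 1).any (fun py =>
              (PySem.List.pyRange 0 (width - (get_shape_dims shape).1 + 1) 1).any (fun px =>
                (pvMaskPair width height px py shape).1 &&
                  ((PySem.Int.band m (pvMaskPair width height px py shape).2 == 0) &&
                    pvSearch width height shapes (rest.map (fun i => PySem.List.pyGetD pieces i 0))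
                      (PySem.Int.bor m (pvMaskPair width height px py shape).2))))) := by
      simp only [pvSearch, pv_dims_eq]
    rw [hB]
    exact (pv_orient_loop hk _ hrel).1

lemma pv_map_insertBy {α β : Type} (g : α → β) (key : β → Int) (x : α) (ys : List α) :
    (PySem.List.insertBy (fun a b => decide (key (g a) < key (g b))) x ys).map g
      = PySem.List.insertBy (fun a b => decide (key a < key b)) (g x) (ys.map g) := by
  induction ys with
  | nil => simp [PySem.List.insertBy]
  | cons y t ih =>
    by_cases h : key (g x) < key (g y)
    · simp [PySem.List.insertBy, h]
    · simp [PySem.List.insertBy, h, ih]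

lemma pv_sorted_map {α β : Type} (g : α → β) (key : β → Int) (key' : α → Int)
    (hkey : key' = fun a => key (g a)) (xs : List α) :
    (PySem.List.sorted xs key' false).map g
      = PySem.List.sorted (xs.map g) key false := by
  subst hkey
  rw [PySem.List.sorted_eq_foldl_insertBy, PySem.List.sorted_eq_foldl_insertBy]
  have haux : ∀ (l : List α) (acc : List α),
      (l.foldl (fun acc x => PySem.List.insertBy
          (fun a b => decide (key (g a) < key (g b))) x acc) acc).map g
        = (l.map g).foldl (fun acc x => PySem.List.insertBy
            (fun a b => decide (key a < key b)) x acc) (acc.map g) := by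
    intro l
    induction l with
    | nil => intro acc; simp
    | cons x t ih =>
      intro acc
      rw [List.foldl_cons, ih, List.map_cons, List.foldl_cons, pv_map_insertBy]
  have := haux xs []
  simpa using this

lemma pv_rel_init (width height : Int) :
    pvRel width height (List.replicate height.toNat (List.replicate width.toNat false)) 0 := by
  refine ⟨⟨by simp, ?_⟩, le_refl 0, ?_⟩
  · intro i hi
    simp
  · intro x y hl
    obtain ⟨hx0, hxw, hy0, hyh⟩ := hl
    rw [pvCell, PySem.List.pyGetD_eq_getElem _ [] hy0 (by simp; omega)]
    rw [List.getElem_replicate, PySem.List.pyGetD_eq_getElem _ false hx0 (by simp; omega)]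
    simp

-- ===== the shared semantic layer: candidate-mask lists over Nat and the existence search =====

def pvMaskN? (width height px py : Int) (shape : List (Int × Int)) : Option Nat :=
  if shape.all (fun c => decide (pvLegal width height (px + c.1) (py + c.2)))
    then some (pvEncMaskN width (pvCells shape px py) 0) else none

def pvCandN (width height : Int) (orients : List (List (Int × Int))) : List Nat :=
  orients.flatMap (fun shape =>
    (PySem.List.pyRange 0 (height - (get_shape_dims shape).2 + 1) 1).flatMap (fun py =>
      (PySem.List.pyRange 0 (width - (get_shape_dims shape).1 + 1) 1).filterMap (fun px =>
        pvMaskN? width height px py shape)))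

def pvE : List (List Nat) → Nat → Bool
  | [], _ => true
  | c :: cs, g => c.any (fun m => (g &&& m == 0) && pvE cs (g ||| m))

-- pointwise congruence helper for List.any
lemma pv_any_ext {α : Type} (l : List α) {p q : α → Bool} (h : ∀ x, p x = q x) :
    l.any p = l.any q := by
  induction l with
  | nil => rfl
  | cons a t ih => simp [List.any_cons, h a, ih]

lemma pv_flatMap_map {α β γ : Type} (f : α → β) (g : β → List γ) (l : List α) :
    (l.map f).flatMap g = l.flatMap (fun x => g (f x)) := by
  induction l with
  | nil => rfl
  | cons a t ih => simp [ih]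

lemma pv_cast_beq_zero (k : Nat) : (((k : Nat) : Int) == (0 : Int)) = (k == 0) := by
  by_cases h : k = 0
  · subst h; simp
  · have h1 : ¬ (((k : Nat) : Int) = 0) := by exact_mod_cast h
    simp [h, h1]

-- maskOptB characterised via pvMaskFold
def pvOptFold (width height px py : Int) (shape : List (Int × Int)) (st : Option Int) : Option Int :=
  shape.foldl (fun st c =>
    match st with
    | none => none
    | some m =>
      let nx := px + c.1
      let ny := py + c.2
      if 0 ≤ nx ∧ nx < width ∧ 0 ≤ ny ∧ ny < height then
        some (PySem.Int.bor m ((1 : Int) <<< (ny * width + nx).toNat))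
      else none) st

lemma pv_optFold_eq (width height px py : Int) (shape : List (Int × Int)) :
    maskOptB width height px py shape = pvOptFold width height px py shape (some 0) := rfl

lemma pv_optFold_none (width height px py : Int) (shape : List (Int × Int)) :
    pvOptFold width height px py shape none = none := by
  induction shape with
  | nil => rfl
  | cons c t ih => simpa [pvOptFold] using ih

lemma pv_optFold_some (width height px py : Int) (shape : List (Int × Int)) :
    ∀ m : Int, pvOptFold width height px py shape (some m)
      = (if (pvMaskFold width height px py shape (true, m)).1
          then some (pvMaskFold width height px py shape (true, m)).2 else none) := by
  induction shape with
  | nil => intro m; rfl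
  | cons c t ih =>
    intro m
    by_cases hc : pvLegal width height (px + c.1) (py + c.2)
    · have h1 : pvOptFold width height px py (c :: t) (some m)
          = pvOptFold width height px py t
              (some (PySem.Int.bor m ((1 : Int) <<< ((py + c.2) * width + (px + c.1)).toNat))) := by
        simp [pvOptFold, hc]
      have h2 : pvMaskFold width height px py (c :: t) (true, m)
          = pvMaskFold width height px py t
              (true, PySem.Int.bor m ((1 : Int) <<< ((py + c.2) * width + (px + c.1)).toNat)) := by
        simp [pvMaskFold, hc]
      rw [h1, h2, ih]
    · have h1 : pvOptFold width height px py (c :: t) (some m)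
          = pvOptFold width height px py t none := by
        simp [pvOptFold, hc]
      have h2 : pvMaskFold width height px py (c :: t) (true, m)
          = pvMaskFold width height px py t (false, m) := by
        simp [pvMaskFold, hc]
      rw [h1, pv_optFold_none, h2, pv_maskFold_false]
      simp

lemma pv_maskOptB_char (width height px py : Int) (shape : List (Int × Int)) :
    maskOptB width height px py shape
      = (pvMaskN? width height px py shape).map (fun n => ((n : Nat) : Int)) := by
  rw [pv_optFold_eq, pv_optFold_some, ← pv_maskFold_eq, pvMaskN?]
  by_cases h : shape.all (fun c => decide (pvLegal width height (px + c.1) (py + c.2))) = true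
  · have hfst : (pvMaskPair width height px py shape).1 = true := by rw [pv_maskof_fst]; exact h
    have hleg : ∀ c ∈ shape, pvLegal width height (px + c.1) (py + c.2) := by
      intro c hc
      have := List.all_eq_true.mp h c hc
      simpa using this
    rw [if_pos hfst, if_pos h, pv_maskof_snd width height px py shape hleg]
    rfl
  · have hfst : (pvMaskPair width height px py shape).1 = false := by
      rw [pv_maskof_fst]
      simpa using h
    rw [if_neg (by simp [hfst]), if_neg h]
    rfl

lemma pv_masksB_eq (width height : Int) (orients : List (List (Int × Int))) :
    masksB width height orients = (pvCandN width height orients).map (fun n => ((n : Nat) : Int)) := by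
  simp only [masksB, pvCandN, pv_dims_eq, List.map_flatMap, List.map_filterMap]
  apply List.flatMap_congr
  intro shape _
  apply List.flatMap_congr
  intro py _
  apply List.filterMap_congr
  intro px _
  rw [pv_maskOptB_char]

-- A-side bridge: pvSearch over a sid list = pvE over the per-sid candidate lists
lemma pv_search_eq_pvE (width height : Int) (shapes : List (List (List (Int × Int)))) :
    ∀ (sids : List Int) (gn : Nat),
      pvSearch width height shapes sids ((gn : Nat) : Int)
        = pvE (sids.map (fun sid => pvCandN width height (PySem.List.pyGetD shapes sid []))) gn := by
  intro sids
  induction sids with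
  | nil => intro gn; simp [pvSearch, pvE]
  | cons sid rest ih =>
    intro gn
    have hL : pvSearch width height shapes (sid :: rest) ((gn : Nat) : Int)
        = (PySem.List.pyGetD shapes sid []).any (fun shape =>
            (PySem.List.pyRange 0 (height - (get_shape_dims shape).2 + 1) 1).any (fun py =>
              (PySem.List.pyRange 0 (width - (get_shape_dims shape).1 + 1) 1).any (fun px =>
                (pvMaskPair width height px py shape).1 &&
                  ((PySem.Int.band ((gn : Nat) : Int) (pvMaskPair width height px py shape).2 == 0) &&
                    pvSearch width height shapes rest
                      (PySem.Int.bor ((gn : Nat) : Int) (pvMaskPair width height px py shape).2))))) := by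
      simp only [pvSearch, pv_dims_eq]
    rw [hL, List.map_cons, pvE, pvCandN, List.any_flatMap]
    apply pv_any_ext
    intro shape
    rw [List.any_flatMap]
    apply pv_any_ext
    intro py
    rw [List.any_filterMap]
    apply pv_any_ext
    intro px
    by_cases h : shape.all (fun c => decide (pvLegal width height (px + c.1) (py + c.2))) = true
    · have hfst : (pvMaskPair width height px py shape).1 = true := by rw [pv_maskof_fst]; exact h
      have hleg : ∀ c ∈ shape, pvLegal width height (px + c.1) (py + c.2) := by
        intro c hc
        have := List.all_eq_true.mp h c hc
        simpa using this
      have hsnd := pv_maskof_snd width height px py shape hleg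
      rw [hfst, hsnd, PySem.Int.band_natCast, PySem.Int.bor_natCast, ih]
      simp only [pvMaskN?, if_pos h, Bool.true_and, pv_cast_beq_zero]
    · have hfst : (pvMaskPair width height px py shape).1 = false := by
        rw [pv_maskof_fst]
        simpa using h
      rw [hfst]
      simp only [pvMaskN?, if_neg h, Bool.false_and]

-- B-side bridge: goB over (mask table, count) pairs = pvE over counts-many copies of each table
lemma pv_goB_aux (masks : List Nat) (restM : List (List Int × Int)) (cs : List (List Nat))
    (hrest : ∀ gn : Nat, goB restM ((gn : Nat) : Int) = pvE cs gn) :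
    ∀ (k : Nat) (left : Int), left.toNat = k → ∀ gn : Nat,
      goB ((masks.map (fun n => ((n : Nat) : Int)), left) :: restM) ((gn : Nat) : Int)
        = pvE (List.replicate k masks ++ cs) gn := by
  intro k
  induction k with
  | zero =>
    intro left hleft gn
    have h0 : left ≤ 0 := by omega
    rw [goB, dif_pos h0]
    simpa using hrest gn
  | succ k ih =>
    intro left hleft gn
    have h0 : ¬ left ≤ 0 := by omega
    rw [goB, dif_neg h0, List.any_map]
    have hrep : List.replicate (k + 1) masks ++ cs = masks :: (List.replicate k masks ++ cs) := by
      simp [List.replicate_succ]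
    rw [hrep, pvE]
    apply pv_any_ext
    intro mn
    simp only [Function.comp]
    rw [PySem.Int.band_natCast, PySem.Int.bor_natCast, ih (left - 1) (by omega) (gn ||| mn),
        pv_cast_beq_zero]

lemma pv_goB (ps : List (List Nat × Int)) :
    ∀ gn : Nat,
      goB (ps.map (fun p => (p.1.map (fun n => ((n : Nat) : Int)), p.2))) ((gn : Nat) : Int)
        = pvE (ps.flatMap (fun p => List.replicate p.2.toNat p.1)) gn := by
  induction ps with
  | nil => intro gn; simp [goB, pvE]
  | cons p t ih =>
    intro gn
    rw [List.map_cons, List.flatMap_cons]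
    exact pv_goB_aux p.1 (t.map (fun p => (p.1.map (fun n => ((n : Nat) : Int)), p.2)))
      (t.flatMap (fun p => List.replicate p.2.toNat p.1)) ih p.2.toNat p.2 rfl gn

-- feasibility is invariant under permuting the candidate lists
lemma pv_or_and_zero (a b c : Nat) : (a ||| b) &&& c = 0 ↔ a &&& c = 0 ∧ b &&& c = 0 := by
  rw [pv_and_eq_zero_iff, pv_and_eq_zero_iff, pv_and_eq_zero_iff]
  constructor
  · intro h
    constructor
    · intro i ⟨ha, hc⟩
      exact h i ⟨by simp [Nat.testBit_or, ha], hc⟩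
    · intro i ⟨hb, hc⟩
      exact h i ⟨by simp [Nat.testBit_or, hb], hc⟩
  · rintro ⟨h1, h2⟩ i ⟨hab, hc⟩
    rw [Nat.testBit_or, Bool.or_eq_true] at hab
    rcases hab with ha | hb
    · exact h1 i ⟨ha, hc⟩
    · exact h2 i ⟨hb, hc⟩

lemma pv_pvE_perm : ∀ {cs cs' : List (List Nat)}, cs.Perm cs' → ∀ g, pvE cs g = pvE cs' g := by
  intro cs cs' hp
  induction hp with
  | nil => intro g; rfl
  | cons x _ ih =>
    intro g
    rw [pvE, pvE]
    apply pv_any_ext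
    intro m
    rw [ih]
  | swap a b l =>
    intro g
    rw [pvE, pvE]
    rw [Bool.eq_iff_iff]
    simp only [List.any_eq_true, Bool.and_eq_true, beq_iff_eq]
    constructor
    · rintro ⟨m1, h1, e1, hh⟩
      rw [pvE, List.any_eq_true] at hh
      obtain ⟨m2, h2, hh2⟩ := hh
      rw [Bool.and_eq_true, beq_iff_eq] at hh2
      obtain ⟨e2, hrec⟩ := hh2
      obtain ⟨e2a, e2b⟩ := (pv_or_and_zero g m1 m2).mp e2
      refine ⟨m2, h2, e2a, ?_⟩
      rw [pvE, List.any_eq_true]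
      refine ⟨m1, h1, ?_⟩
      rw [Bool.and_eq_true, beq_iff_eq]
      refine ⟨(pv_or_and_zero g m2 m1).mpr ⟨e1, by rw [Nat.and_comm]; exact e2b⟩, ?_⟩
      have hor : g ||| m1 ||| m2 = g ||| m2 ||| m1 := by
        rw [Nat.or_assoc, Nat.or_comm m1 m2, ← Nat.or_assoc]
      rwa [← hor]
    · rintro ⟨m2, h2, e2, hh⟩
      rw [pvE, List.any_eq_true] at hh
      obtain ⟨m1, h1, hh2⟩ := hh
      rw [Bool.and_eq_true, beq_iff_eq] at hh2
      obtain ⟨e1, hrec⟩ := hh2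
      obtain ⟨e1a, e1b⟩ := (pv_or_and_zero g m2 m1).mp e1
      refine ⟨m1, h1, e1a, ?_⟩
      rw [pvE, List.any_eq_true]
      refine ⟨m2, h2, ?_⟩
      rw [Bool.and_eq_true, beq_iff_eq]
      refine ⟨(pv_or_and_zero g m1 m2).mpr ⟨e2, by rw [Nat.and_comm]; exact e1b⟩, ?_⟩
      have hor : g ||| m2 ||| m1 = g ||| m1 ||| m2 := by
        rw [Nat.or_assoc, Nat.or_comm m2 m1, ← Nat.or_assoc]
      rwa [← hor]
  | trans _ _ ih1 ih2 =>
    intro g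
    rw [ih1, ih2]

-- range emptiness
lemma pv_pyRange_nil (c : Int) : PySem.List.pyRange 0 c 1 = [] ↔ c ≤ 0 := by
  constructor
  · intro h
    have := congrArg List.length h
    rw [PySem.List.length_pyRange_one] at this
    simp at this
    omega
  · intro h
    have hlen : (PySem.List.pyRange 0 c 1).length = 0 := by
      rw [PySem.List.length_pyRange_one]
      omega
    exact List.eq_nil_of_length_eq_zero hlen

-- A's piece list is empty exactly when no count is positive
lemma pv_pieces_empty (counts : List Int) (s : Int) :
    (((PySem.List.enumerate counts s).flatMap
        (fun p => (PySem.List.pyRange 0 p.2 1).map (fun _ => p.1))).isEmpty)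
      = !(counts.any (fun c => 0 < c)) := by
  rw [Bool.eq_iff_iff, List.isEmpty_iff, List.flatMap_eq_nil_iff, Bool.not_eq_true',
      List.any_eq_false]
  simp only [List.map_eq_nil_iff, pv_pyRange_nil, decide_eq_false_iff_not, not_lt]
  constructor
  · intro h c hc
    have hmem : c ∈ (PySem.List.enumerate counts s).map (fun p => p.2) := by
      rw [PySem.List.map_snd_enumerate]
      exact hc
    obtain ⟨p, hp, hpc⟩ := List.mem_map.mp hmem
    have hple := h p hp
    simp only [decide_eq_true_eq]
    omega
  · intro h p hp
    have hmem : p.2 ∈ counts := by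
      rw [← PySem.List.map_snd_enumerate counts s]
      exact List.mem_map_of_mem hp
    have hnp := h p.2 hmem
    simp only [decide_eq_true_eq] at hnp
    omega

-- the flattened piece list, mapped to candidate lists, is B's replicate flatten
lemma pv_pieces_map_cand (width height : Int) (shapes : List (List (List (Int × Int)))) (counts : List Int) :
    (((PySem.List.enumerate counts 0).flatMap
        (fun p => (PySem.List.pyRange 0 p.2 1).map (fun _ => p.1))).map
        (fun sid => pvCandN width height (PySem.List.pyGetD shapes sid [])))
      = ((PySem.List.pyRange 0 (PySem.List.len counts) 1).map
          (fun sid => (pvCandN width height (PySem.List.pyGetD shapes sid []),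
                       PySem.List.pyGetD counts sid 0))).flatMap
          (fun p => List.replicate p.2.toNat p.1) := by
  rw [List.map_flatMap, PySem.List.enumerate_eq_map_pyRange counts (0 : Int),
      pv_flatMap_map, pv_flatMap_map]
  apply List.flatMap_congr
  intro sid _
  rw [List.map_map]
  have : ((fun sid => pvCandN width height (PySem.List.pyGetD shapes sid []))
      ∘ (fun _ => (sid, PySem.List.pyGetD counts sid 0).1))
      = fun (_ : Int) => pvCandN width height (PySem.List.pyGetD shapes sid []) := rfl
  rw [this, List.map_const', PySem.List.length_pyRange_one]
  congr 1
  omega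

-- ===== VERDICT (by name: the statement is the Claim_ definition above) =====
theorem solve_region_optimized_spec : Claim_equal_solve_region_optimized := by
  intro width height shapes pieces_to_place _hdom _hpre
  show solve_region_optimized width height shapes pieces_to_place
      = solve_region_optimized_alt width height shapes pieces_to_place
  simp only [solve_region_optimized, solve_region_optimized_alt]
  have hpieces : ((PySem.List.enumerate pieces_to_place 0).foldl
        (fun acc p => acc ++ (PySem.List.pyRange 0 p.2 1).map (fun _ => p.1)) [])
      = (PySem.List.enumerate pieces_to_place 0).flatMap
          (fun p => (PySem.List.pyRange 0 p.2 1).map (fun _ => p.1)) := by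
    rw [PySem.List.foldl_append_eq_flatMap]
    rfl
  rw [hpieces]
  set pieces := (PySem.List.enumerate pieces_to_place 0).flatMap
      (fun p => (PySem.List.pyRange 0 p.2 1).map (fun _ => p.1)) with hp
  have hempty : pieces.isEmpty = !(pieces_to_place.any (fun c => 0 < c)) :=
    pv_pieces_empty pieces_to_place 0
  by_cases hA : pieces.isEmpty = true
  · have hB : (!(pieces_to_place.any (fun c => 0 < c))) = true := by rw [← hempty]; exact hA
    rw [if_pos hA, if_pos hB]
  · have hB : ¬ ((!(pieces_to_place.any (fun c => 0 < c))) = true) := by rw [← hempty]; exact hA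
    rw [if_neg hA, if_neg hB]
    by_cases hN : (((PySem.List.pyRange 0 (PySem.List.len pieces_to_place) 1).map
        (fun sid => PySem.List.len (PySem.List.pyGetD (PySem.List.pyGetD shapes sid []) 0 []) *
          PySem.List.pyGetD pieces_to_place sid 0)).sum > width * height)
    · rw [if_pos hN, if_pos hN]
    · rw [if_neg hN, if_neg hN]
      have horder : (PySem.List.sorted (PySem.List.pyRange 0 (PySem.List.len pieces) 1)
          (fun i => -(PySem.List.len (PySem.List.pyGetD
            (PySem.List.pyGetD shapes (PySem.List.pyGetD pieces i 0) []) 0 [])))).map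
              (fun i => PySem.List.pyGetD pieces i 0)
          = PySem.List.sorted pieces
              (fun sid => -(PySem.List.len (PySem.List.pyGetD
                (PySem.List.pyGetD shapes sid []) 0 []))) := by
        rw [pv_sorted_map (fun i => PySem.List.pyGetD pieces i 0)
          (fun sid => -(PySem.List.len (PySem.List.pyGetD (PySem.List.pyGetD shapes sid []) 0 [])))
          _ rfl]
        rw [PySem.List.map_pyGetD_pyRange_zero pieces 0]
      rw [pv_backtrack width height shapes pieces _ (pv_rel_init width height), horder]
      have hAE := pv_search_eq_pvE width height shapes
        (PySem.List.sorted pieces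
          (fun sid => -(PySem.List.len (PySem.List.pyGetD
            (PySem.List.pyGetD shapes sid []) 0 [])))) 0
      rw [Nat.cast_zero] at hAE
      rw [hAE]
      have hBpairs : ((PySem.List.pyRange 0 (PySem.List.len pieces_to_place) 1).map
            (fun sid => (masksB width height (PySem.List.pyGetD shapes sid []),
                         PySem.List.pyGetD pieces_to_place sid 0)))
          = ((PySem.List.pyRange 0 (PySem.List.len pieces_to_place) 1).map
              (fun sid => (pvCandN width height (PySem.List.pyGetD shapes sid []),
                           PySem.List.pyGetD pieces_to_place sid 0))).map
              (fun p => (p.1.map (fun n => ((n : Nat) : Int)), p.2)) := by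
        rw [List.map_map]
        apply List.map_congr_left
        intro sid _
        simp only [Function.comp]
        rw [pv_masksB_eq]
      have hBE := pv_goB ((PySem.List.pyRange 0 (PySem.List.len pieces_to_place) 1).map
          (fun sid => (pvCandN width height (PySem.List.pyGetD shapes sid []),
                       PySem.List.pyGetD pieces_to_place sid 0))) 0
      rw [Nat.cast_zero] at hBE
      rw [hBpairs, hBE]
      apply pv_pvE_perm
      rw [← pv_pieces_map_cand width height shapes pieces_to_place]
      exact (PySem.List.sorted_perm pieces
        (fun sid => -(PySem.List.len (PySem.List.pyGetD
          (PySem.List.pyGetD shapes sid []) 0 []))) false).map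
        (fun sid => pvCandN width height (PySem.List.pyGetD shapes sid []))
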